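-- pv_equiv track=rewrite | github.com/linancn/TianGong-AI-Unstructure | src/education/1_chunk_by_title_docx_pickle.py | merge_title_blocks
-- ===== SOURCE A (Python) =====
-- def merge_title_blocks(text_list):
--     merged_list = []
--     title_buffer = []
--
--     for text in text_list:
--         stripped_text = text.strip()
--         if stripped_text and (
--             not stripped_text.endswith(".") and not "\n" in stripped_text
--         ):  # This is a title block
--             title_buffer.append(stripped_text)
--         else:
--             if title_buffer:
--                 merged_title = "\n".join(title_buffer)
--                 merged_list.append(merged_title + "\n" + text)
--                 title_buffer = []
--             else:
--                 merged_list.append(text)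
--
--     if title_buffer:
--         if merged_list:
--             merged_list[-1] += "\n" + "\n".join(title_buffer)
--         else:
--             merged_list.append("\n".join(title_buffer))
--
--     return merged_list
-- ===== SOURCE B (Python) =====
-- def merge_title_blocks(text_list):
--     def is_title(s):
--         t = s.strip()
--         return bool(t) and not t.endswith(".") and "\n" not in t
--
--     out = []
--     pending = None
--     i, n = 0, len(text_list)
--     while i < n:
--         j = i
--         while j < n and is_title(text_list[j]):
--             j += 1
--         titles = [text_list[k].strip() for k in range(i, j)]
--         if j == n:
--             pending = "\n".join(titles)
--             break
--         out.append(("\n".join(titles) + "\n" + text_list[j]) if titles else text_list[j])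
--         i = j + 1
--     if pending is not None:
--         if out:
--             out[-1] += "\n" + pending
--         else:
--             out.append(pending)
--     return out
-- ===== Notes on version B (the rewrite author's own statement) =====
-- stated objective: alternative
-- what changed: A threads one accumulator pair (merged_list, title_buffer) through a single element-wise loop; B walks the list run by run, taking each leading span of title lines and attaching it to the following text block, with the trailing title run handled once after the walk.
import Mathlib
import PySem

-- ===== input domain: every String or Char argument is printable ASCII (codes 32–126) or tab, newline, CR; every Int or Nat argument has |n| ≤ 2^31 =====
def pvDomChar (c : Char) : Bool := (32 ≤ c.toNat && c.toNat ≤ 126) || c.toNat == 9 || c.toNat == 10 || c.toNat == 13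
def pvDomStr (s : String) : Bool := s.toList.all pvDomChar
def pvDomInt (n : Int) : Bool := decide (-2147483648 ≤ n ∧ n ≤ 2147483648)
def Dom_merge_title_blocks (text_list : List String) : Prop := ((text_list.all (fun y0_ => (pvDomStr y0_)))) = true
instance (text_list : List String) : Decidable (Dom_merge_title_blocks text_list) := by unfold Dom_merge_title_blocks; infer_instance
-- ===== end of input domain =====

-- B re-decomposes A's single accumulator loop into a span/run walk (take the leading title run,
-- then its following text block, then recurse); objective: alternative decomposition, same cost.

-- ===== PORT A =====
-- loop body of A's single for-loop; state = (merged_list, title_buffer)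
def mtbStepA (st : List String × List String) (text : String) : List String × List String :=
  let stripped := PySem.Str.strip text
  if !(stripped == "") && !(PySem.Str.endswith stripped ".") && !(PySem.Str.isIn "\n" stripped) then
    (st.1, st.2 ++ [stripped])
  else if st.2.isEmpty then
    (st.1 ++ [text], [])
  else
    (st.1 ++ [PySem.Str.join "\n" st.2 ++ "\n" ++ text], [])

def merge_title_blocks (text_list : List String) : List String :=
  let st := text_list.foldl mtbStepA ([], [])
  if st.2.isEmpty then st.1
  else if st.1.isEmpty then [PySem.Str.join "\n" st.2]
  else st.1.dropLast ++ [st.1.getLast! ++ "\n" ++ PySem.Str.join "\n" st.2]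

-- ===== PORT B =====
-- B's title predicate
def mtbIsTitle (s : String) : Bool :=
  let t := PySem.Str.strip s
  !(t == "") && !(PySem.Str.endswith t ".") && !(PySem.Str.isIn "\n" t)

-- B's main while-loop: take the leading run of titles, attach it to the next text, recurse;
-- returns (emitted blocks, dangling joined trailing titles)
def mtbGo : List String → List String × Option String
  | [] => ([], none)
  | x :: xs =>
    let t := List.takeWhile mtbIsTitle (x :: xs)
    match h : List.dropWhile mtbIsTitle (x :: xs) with
    | [] => ([], some (PySem.Str.join "\n" (t.map PySem.Str.strip)))
    | y :: ys =>
      let r := mtbGo ys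
      ((if t.isEmpty then y
        else PySem.Str.join "\n" (t.map PySem.Str.strip) ++ "\n" ++ y) :: r.1, r.2)
  termination_by l => l.length
  decreasing_by
    have h1 := List.length_dropWhile_le (p := mtbIsTitle) (l := x :: xs)
    rw [h] at h1
    simp at h1 ⊢
    omega

def merge_title_blocks_alt (text_list : List String) : List String :=
  let r := mtbGo text_list
  match r.2 with
  | none => r.1
  | some p => if r.1.isEmpty then [p] else r.1.dropLast ++ [r.1.getLast! ++ "\n" ++ p]

-- ===== PRECONDITION & SPEC =====
def Spec_merge_title_blocks (text_list : List String) (out : List String) : Prop := out = merge_title_blocks_alt text_list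
instance (text_list : List String) (out : List String) : Decidable (Spec_merge_title_blocks text_list out) := by unfold Spec_merge_title_blocks; infer_instance

-- ===== CLAIM (what is proved, stated in full; the proofs are below) =====
def Claim_equal_merge_title_blocks : Prop := ∀ (text_list : List String), Dom_merge_title_blocks text_list → Spec_merge_title_blocks text_list (merge_title_blocks text_list)

-- ===== LEMMAS AND PROOFS =====

-- structural-recursion form of A's fold (proof helper)
def mtbAB (buf : List String) : List String → List String × List String
  | [] => ([], buf)
  | x :: xs =>
    if mtbIsTitle x then mtbAB (buf ++ [PySem.Str.strip x]) xs
    else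
      let r := mtbAB [] xs
      ((if buf.isEmpty then x
        else PySem.Str.join "\n" buf ++ "\n" ++ x) :: r.1, r.2)

theorem mtbStepA_eq (st : List String × List String) (text : String) :
    mtbStepA st text =
      if mtbIsTitle text then (st.1, st.2 ++ [PySem.Str.strip text])
      else if st.2.isEmpty then (st.1 ++ [text], [])
      else (st.1 ++ [PySem.Str.join "\n" st.2 ++ "\n" ++ text], []) := by
  simp [mtbStepA, mtbIsTitle]

theorem mtbFoldA_eq (l : List String) :
    ∀ (m buf : List String),
      l.foldl mtbStepA (m, buf) = (m ++ (mtbAB buf l).1, (mtbAB buf l).2) := by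
  induction l with
  | nil => intro m buf; simp [mtbAB]
  | cons x xs ih =>
    intro m buf
    rw [List.foldl_cons, mtbStepA_eq]
    by_cases hx : mtbIsTitle x
    · simp only [hx, if_pos]
      rw [ih]
      simp [mtbAB, hx]
    · simp only [hx]
      by_cases hb : buf.isEmpty <;> simp [hb, mtbAB, hx, ih]

theorem mtbAB_span (l : List String) :
    ∀ (buf : List String),
      mtbAB buf l =
        (match List.dropWhile mtbIsTitle l with
         | [] => ([], buf ++ (List.takeWhile mtbIsTitle l).map PySem.Str.strip)
         | y :: ys =>
           ((if (buf ++ (List.takeWhile mtbIsTitle l).map PySem.Str.strip).isEmpty then y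
             else PySem.Str.join "\n" (buf ++ (List.takeWhile mtbIsTitle l).map PySem.Str.strip) ++ "\n" ++ y)
              :: (mtbAB [] ys).1,
            (mtbAB [] ys).2)) := by
  induction l with
  | nil => intro buf; simp [mtbAB]
  | cons x xs ih =>
    intro buf
    by_cases hx : mtbIsTitle x
    · rw [show mtbAB buf (x :: xs) = mtbAB (buf ++ [PySem.Str.strip x]) xs by simp [mtbAB, hx]]
      rw [ih]
      simp [hx]
    · simp [mtbAB, hx]

theorem mtbGo_eq_AB (l : List String) :
    mtbGo l = ((mtbAB [] l).1,
      if (mtbAB [] l).2.isEmpty then none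
      else some (PySem.Str.join "\n" (mtbAB [] l).2)) := by
  induction l using mtbGo.induct with
  | case1 => simp [mtbGo, mtbAB]
  | case2 x xs h =>
    have hAB := mtbAB_span (x :: xs) []
    rw [h] at hAB
    have htw : List.takeWhile mtbIsTitle (x :: xs) = x :: xs := by
      have := List.takeWhile_append_dropWhile (p := mtbIsTitle) (l := x :: xs)
      rw [h] at this; simpa using this
    rw [mtbGo, h]
    simp only [hAB, htw]
    simp
  | case3 x xs y ys heq ih =>
    have hAB := mtbAB_span (x :: xs) []
    rw [heq] at hAB
    rw [mtbGo, heq]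
    simp only [hAB, ih]
    simp

theorem merge_title_blocks_spec : Claim_equal_merge_title_blocks := by
  unfold Claim_equal_merge_title_blocks
  intro l _
  unfold Spec_merge_title_blocks merge_title_blocks merge_title_blocks_alt
  rw [mtbFoldA_eq l [] [], mtbGo_eq_AB l]
  by_cases hb : (mtbAB [] l).2.isEmpty
  · simp [hb]
  · by_cases hm : (mtbAB [] l).1.isEmpty <;> simp [hb, hm]
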